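-- pv_equiv track=rewrite | github.com/aepaysinger/code-challenges | code_challenges/code_wars/lonliest_character.py | loneliest
-- ===== SOURCE A (Python) =====
-- def loneliest(strng):
--     characters_space_count = {}
--     strng = strng.strip()
--     count = 0
--     old_count = 0
--     current_character = strng[0]
--
--     for i in range(1, len(strng)):
--         if strng[i] == " ":
--             count += 1
--         else:
--             characters_space_count[current_character] = count + old_count
--             old_count = count
--             count = 0
--             current_character = strng[i]
--     characters_space_count[current_character] = count + old_count
--
--     return [
--         character
--         for character, count in characters_space_count.items()
--         if count == max(characters_space_count.values())
--     ]
-- ===== SOURCE B (Python) =====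
-- def loneliest(strng):
--     s = strng.strip()
--     left = []
--     run = 0
--     for ch in s:
--         left.append(run)
--         run = run + 1 if ch == " " else 0
--     right = []
--     run = 0
--     for ch in reversed(s):
--         right.append(run)
--         run = run + 1 if ch == " " else 0
--     right.reverse()
--     scores = {}
--     for ch, l, r in zip(s, left, right):
--         if ch != " ":
--             scores[ch] = l + r
--     m = max(scores.values())
--     return [c for c, v in scores.items() if v == m]
-- ===== Notes on version B (the rewrite author's own statement) =====
-- stated objective: alternative
-- what changed: B replaces A's single stateful scan (current-character/count/old_count bookkeeping) by two independent run-length passes building left[] and right[] space-run tables and a zip pass assigning each non-space character left+right.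
import Mathlib
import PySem

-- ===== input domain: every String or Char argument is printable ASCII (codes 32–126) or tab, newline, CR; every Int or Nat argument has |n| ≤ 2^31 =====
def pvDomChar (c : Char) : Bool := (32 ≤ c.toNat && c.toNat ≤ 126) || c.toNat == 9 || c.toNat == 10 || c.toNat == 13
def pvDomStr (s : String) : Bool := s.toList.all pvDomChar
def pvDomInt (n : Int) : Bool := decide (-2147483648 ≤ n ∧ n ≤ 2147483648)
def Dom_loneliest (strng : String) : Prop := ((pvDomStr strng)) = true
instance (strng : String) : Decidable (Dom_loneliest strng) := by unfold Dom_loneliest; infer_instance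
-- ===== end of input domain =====

-- B replaces A's single stateful scan by two run-length table passes (left/right space runs) plus a zip pass; same O(n) cost, different decomposition.

-- ===== PORT A =====
-- loop body of A's for-loop: state = (dict, count, old_count, current_character)
def aStep (acc : PySem.Dict Char Int × Int × Int × Char) (x : Char) :
    PySem.Dict Char Int × Int × Int × Char :=
  if x == ' ' then (acc.1, acc.2.1 + 1, acc.2.2.1, acc.2.2.2)
  else (acc.1.insert acc.2.2.2 (acc.2.1 + acc.2.2.1), 0, acc.2.1, x)

-- body of A after the strng[0] access succeeded (s = the stripped characters, c0 = strng[0])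
def aMain (c0 : Char) (rest : List Char) : List String :=
  let s := c0 :: rest
  let st := (PySem.List.pyRange 1 (PySem.List.len s) 1).foldl
    (fun acc i => aStep acc (PySem.List.pyGetD s i ' '))
    (PySem.Dict.empty, 0, 0, c0)
  let d := st.1.insert st.2.2.2 (st.2.1 + st.2.2.1)
  match PySem.List.max? d.values id with
  | none => []
  | some m => (d.items.filter (fun p => p.2 == m)).map (fun p => String.ofList [p.1])

def loneliest (strng : String) : List String :=
  match (PySem.Str.strip strng).toList with
  | [] => []   -- strng[0] raises IndexError here; excluded by Pre_loneliest
  | c0 :: rest => aMain c0 rest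

-- ===== PORT B =====
-- one step of the run-length scans building left[]/right[]: state = (table, current run)
def runStep (acc : List Int × Int) (ch : Char) : List Int × Int :=
  (acc.1 ++ [acc.2], if ch == ' ' then acc.2 + 1 else 0)

-- one step of the scores loop over zip(s, left, right)
def scoreStep (d : PySem.Dict Char Int) (p : Char × Int × Int) : PySem.Dict Char Int :=
  if p.1 != ' ' then d.insert p.1 (p.2.1 + p.2.2) else d

def bMain (s : List Char) : List String :=
  let left := (s.foldl runStep ([], 0)).1
  let right := ((s.reverse.foldl runStep ([], 0)).1).reverse
  let scores := (s.zip (left.zip right)).foldl scoreStep PySem.Dict.empty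
  match PySem.List.max? scores.values id with
  | none => []   -- max() over no values raises ValueError here; excluded by Pre_loneliest
  | some m => (scores.items.filter (fun p => p.2 == m)).map (fun p => String.ofList [p.1])

def loneliest_alt (strng : String) : List String :=
  bMain ((PySem.Str.strip strng).toList)

-- ===== PRECONDITION & SPEC =====
-- Pre_ excludes exactly the strings that are empty after strip(): there A raises IndexError at strng[0].
def Pre_loneliest (strng : String) : Prop := (PySem.Str.strip strng).toList ≠ []
instance (strng : String) : Decidable (Pre_loneliest strng) := by unfold Pre_loneliest; infer_instance

def pvWitness_loneliest : String := "a  b c"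

def Spec_loneliest (strng : String) (out : List String) : Prop := out = loneliest_alt strng
instance (strng : String) (out : List String) : Decidable (Spec_loneliest strng out) := by unfold Spec_loneliest; infer_instance

-- ===== CLAIM (what is proved, stated in full; the proofs are below) =====
def Claim_equal_loneliest : Prop := ∀ (strng : String), Dom_loneliest strng → Pre_loneliest strng → Spec_loneliest strng (loneliest strng)

-- ===== LEMMAS AND PROOFS =====

-- number of leading spaces
def leadS : List Char → Int
  | [] => 0
  | x :: xs => if x == ' ' then leadS xs + 1 else 0

-- insertion events produced by B's scores loop over s with pending left-run r
def evB : List Char → Int → List (Char × Int)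
  | [], _ => []
  | x :: xs, r => if x == ' ' then evB xs (r + 1) else (x, r + leadS xs) :: evB xs 0

-- insertion events produced by A's loop from state (count, old_count, current)
def ev : List Char → Int → Int → Char → List (Char × Int)
  | [], cnt, old, cur => [(cur, cnt + old)]
  | x :: xs, cnt, old, cur =>
      if x == ' ' then ev xs (cnt + 1) old cur else (cur, cnt + old) :: ev xs 0 cnt x

-- left run table, pure form
def runsL : List Char → Int → List Int
  | [], _ => []
  | x :: xs, r => r :: runsL xs (if x == ' ' then r + 1 else 0)

-- final run value after a scan
def trailR : List Char → Int → Int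
  | [], r => r
  | x :: xs, r => trailR xs (if x == ' ' then r + 1 else 0)

-- right run table, pure form
def runsR : List Char → List Int
  | [] => []
  | _ :: xs => leadS xs :: runsR xs

theorem a_fold_eq_ev (t : List Char) (d : PySem.Dict Char Int) (cnt old : Int) (cur : Char) :
    (t.foldl aStep (d, cnt, old, cur)).1.insert (t.foldl aStep (d, cnt, old, cur)).2.2.2
        ((t.foldl aStep (d, cnt, old, cur)).2.1 + (t.foldl aStep (d, cnt, old, cur)).2.2.1) =
      (ev t cnt old cur).foldl (fun d p => d.insert p.1 p.2) d := by
  induction t generalizing d cnt old cur with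
  | nil => simp [ev]
  | cons x xs ih =>
      simp only [List.foldl_cons, aStep]
      by_cases h : x = ' ' <;> simp [ev, h, ih]

theorem runs_fold (s : List Char) (acc : List Int) (r : Int) :
    (s.foldl runStep (acc, r)).1 = acc ++ runsL s r := by
  induction s generalizing acc r with
  | nil => simp [runsL]
  | cons x xs ih => simp [runStep, runsL, ih]

theorem runsL_append (a b : List Char) (r : Int) :
    runsL (a ++ b) r = runsL a r ++ runsL b (trailR a r) := by
  induction a generalizing r with
  | nil => simp [runsL, trailR]
  | cons x xs ih => simp [runsL, trailR, ih]

theorem trailR_concat (l : List Char) (x : Char) (r : Int) :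
    trailR (l ++ [x]) r = if x == ' ' then trailR l r + 1 else 0 := by
  induction l generalizing r with
  | nil => simp [trailR]
  | cons y ys ih => simp [trailR, ih]

theorem trailR_reverse (l : List Char) : trailR l.reverse 0 = leadS l := by
  induction l with
  | nil => simp [trailR, leadS]
  | cons x xs ih => simp [leadS, trailR_concat, ih]

theorem runsL_reverse (s : List Char) : (runsL s.reverse 0).reverse = runsR s := by
  induction s with
  | nil => simp [runsL, runsR]
  | cons x xs ih =>
      simp only [List.reverse_cons, runsL_append, trailR_reverse]
      simp [runsL, runsR, ih]

theorem b_fold_eq_evB (s : List Char) (r : Int) (d : PySem.Dict Char Int) :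
    ((s.zip ((runsL s r).zip (runsR s))).foldl scoreStep d) =
      (evB s r).foldl (fun d p => d.insert p.1 p.2) d := by
  induction s generalizing r d with
  | nil => simp [runsL, runsR, evB]
  | cons x xs ih =>
      by_cases h : x = ' ' <;> simp [runsL, runsR, evB, scoreStep, h, ih]

theorem ev_eq_evB (t : List Char) (cnt old : Int) (cur : Char) :
    ev t cnt old cur = (cur, cnt + old + leadS t) :: evB t cnt := by
  induction t generalizing cnt old cur with
  | nil => simp [ev, evB, leadS]
  | cons x xs ih =>
      by_cases h : x = ' '
      · simp [ev, evB, leadS, h, ih]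
        omega
      · simp [ev, evB, leadS, h, ih]

theorem strip_head_not_space (l : List Char) (c0 : Char) (t : List Char)
    (h : PySem.Chars.strip l = c0 :: t) : (c0 == ' ') = false := by
  have hpre : (c0 :: t) <+: PySem.Chars.lstrip l := by
    rw [PySem.Chars.strip, PySem.Chars.rstrip] at h
    rw [← h]
    simpa using (List.dropWhile_suffix (l := (PySem.Chars.lstrip l).reverse)
      PySem.Chars.isspace).reverse
  obtain ⟨rest, hr⟩ := hpre
  have hh : (List.dropWhile PySem.Chars.isspace l).head? = some c0 := by
    rw [show List.dropWhile PySem.Chars.isspace l = PySem.Chars.lstrip l from rfl, ← hr]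
    rfl
  have h2 := List.head?_dropWhile_not PySem.Chars.isspace l
  rw [hh] at h2
  rcases eq_or_ne c0 ' ' with hc | hc
  · subst hc
    exact absurd h2 (by decide)
  · simp [hc]

theorem aMain_eq_bMain (c0 : Char) (rest : List Char) (hc0 : (c0 == ' ') = false) :
    aMain c0 rest = bMain (c0 :: rest) := by
  have hrange : (PySem.List.pyRange 1 (PySem.List.len (c0 :: rest)) 1).foldl
      (fun acc i => aStep acc (PySem.List.pyGetD (c0 :: rest) i ' '))
      (PySem.Dict.empty, 0, 0, c0) = rest.foldl aStep (PySem.Dict.empty, 0, 0, c0) := by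
    simpa using PySem.List.foldl_pyRange_pyGetD (c0 :: rest) ' ' aStep
      (PySem.Dict.empty, 0, 0, c0) (a := 1) (by norm_num)
  have hleft : ((c0 :: rest).foldl runStep ([], 0)).1 = runsL (c0 :: rest) 0 := by
    simpa using runs_fold (c0 :: rest) [] 0
  have hright : (((c0 :: rest).reverse.foldl runStep ([], 0)).1).reverse = runsR (c0 :: rest) := by
    rw [runs_fold (c0 :: rest).reverse [] 0]
    simpa using runsL_reverse (c0 :: rest)
  simp only [aMain, bMain]
  rw [hrange, hleft, hright, b_fold_eq_evB, a_fold_eq_ev, ev_eq_evB]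
  simp [evB, hc0]

-- ===== VERDICT (by name: the statement is the Claim_ definition above) =====
theorem loneliest_spec : Claim_equal_loneliest := by
  intro strng _ hpre
  unfold Spec_loneliest loneliest loneliest_alt
  rcases hl : (PySem.Str.strip strng).toList with _ | ⟨c0, rest⟩
  · exact absurd hl hpre
  · have hc0 : (c0 == ' ') = false :=
      strip_head_not_space strng.toList c0 rest ((PySem.Str.toList_strip strng) ▸ hl)
    exact aMain_eq_bMain c0 rest hc0
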